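-- pv_equiv track=rewrite | github.com/kostiantynn/OP_EXAM_PREPARATION | 9-th_labs/laba_10/logic.py | __find_same__
-- ===== SOURCE A (Python) =====
-- def __find_same__(string):
--     arr_index = []
--     for i in range(len(string)):
--         for j in range(len(string)):
--             if string[i] == string[j] and i != j:
--                 arr_index.append(i)
--                 arr_index.append(j)
--     return set(arr_index)
-- ===== SOURCE B (Python) =====
-- def __find_same__(string):
--     groups = {}
--     for i, ch in enumerate(string):
--         groups.setdefault(ch, []).append(i)
--     result = set()
--     for idxs in groups.values():
--         if len(idxs) >= 2:
--             result.update(idxs)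
--     return result
-- ===== Notes on version B (the rewrite author's own statement) =====
-- stated objective: faster
-- what changed: Replaced the quadratic all-pairs index comparison by one pass that groups indices per character in a dict and emits every index of any group with at least two positions.
import Mathlib
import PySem

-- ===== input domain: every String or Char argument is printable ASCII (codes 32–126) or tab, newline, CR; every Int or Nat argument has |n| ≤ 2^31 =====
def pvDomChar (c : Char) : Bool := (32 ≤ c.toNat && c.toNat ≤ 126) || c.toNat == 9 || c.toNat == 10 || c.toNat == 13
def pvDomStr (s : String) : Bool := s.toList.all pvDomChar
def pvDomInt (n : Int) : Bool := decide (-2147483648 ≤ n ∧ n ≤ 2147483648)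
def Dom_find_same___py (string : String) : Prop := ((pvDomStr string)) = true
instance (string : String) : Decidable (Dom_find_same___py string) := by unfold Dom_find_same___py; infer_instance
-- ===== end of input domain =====

-- B replaces A's quadratic all-pairs index comparison by one grouping pass (dict char -> index list),
-- emitting every index of any group with at least two positions.

-- ===== PORT A =====
def find_same___py (string : String) : List Int :=
  let arr_index : List Int :=
    (PySem.List.pyRange 0 (PySem.Str.len string) 1).foldl (fun acc i =>
      (PySem.List.pyRange 0 (PySem.Str.len string) 1).foldl (fun acc j =>
        if PySem.Str.pyGet? string i = PySem.Str.pyGet? string j ∧ i ≠ j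
        then acc ++ [i] ++ [j] else acc) acc) []
  PySem.Set.ofList arr_index

-- ===== PORT B =====
def find_same___py_alt (string : String) : List Int :=
  let groups : PySem.Dict Char (List Int) :=
    (PySem.List.enumerate string.toList 0).foldl
      (fun d p => d.modify p.2 [] (fun l => l ++ [p.1])) PySem.Dict.empty
  (PySem.Dict.values groups).foldl
    (fun s idxs => if 2 ≤ idxs.length then PySem.Set.update s idxs else s)
    PySem.Set.empty

-- ===== PRECONDITION & SPEC =====
def Spec_find_same___py (string : String) (out : List Int) : Prop := out = find_same___py_alt string
instance (string : String) (out : List Int) : Decidable (Spec_find_same___py string out) := by unfold Spec_find_same___py; infer_instance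

-- ===== CLAIM (what is proved, stated in full; the proofs are below) =====
def Claim_equal_find_same___py : Prop := ∀ (string : String), Dom_find_same___py string → Spec_find_same___py string (find_same___py string)

-- ===== LEMMAS AND PROOFS =====

-- indices (as Int) at which character c occurs in cs, ascending
def pvOcc (cs : List Char) (c : Char) : List Int :=
  ((PySem.List.enumerate cs 0).filter (fun p => p.2 == c)).map (·.1)

def pvF (cs : List Char) (c : Char) : List Int :=
  if 2 ≤ (pvOcc cs c).length then pvOcc cs c else []

lemma mem_pvOcc {cs : List Char} {c : Char} {x : Int} :
    x ∈ pvOcc cs c ↔ ∃ (k : Nat) (h : k < cs.length), x = (k : Int) ∧ cs[k] = c := by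
  simp only [pvOcc, List.mem_map, List.mem_filter, PySem.List.mem_enumerate_iff]
  constructor
  · rintro ⟨p, ⟨⟨k, h, rfl⟩, hc⟩, rfl⟩
    refine ⟨k, h, by simp, by simpa using hc⟩
  · rintro ⟨k, h, rfl, hc⟩
    exact ⟨((k : Int), cs[k]), ⟨⟨k, h, by simp⟩, by simpa using hc⟩, rfl⟩

lemma pairwise_pvOcc (cs : List Char) (c : Char) : (pvOcc cs c).Pairwise (· < ·) := by
  have h := PySem.List.pairwise_lt_enumerate cs (0 : Int)
  exact List.Pairwise.map _ (by intro a b hab; exact hab) (List.Pairwise.filter _ h)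

lemma nodup_pvOcc (cs : List Char) (c : Char) : (pvOcc cs c).Nodup :=
  (pairwise_pvOcc cs c).imp (fun h => ne_of_lt h)

lemma pvOcc_disjoint {cs : List Char} {c c' : Char} (hne : c ≠ c') {x : Int}
    (h : x ∈ pvOcc cs c) : x ∉ pvOcc cs c' := by
  rw [mem_pvOcc] at h
  obtain ⟨k, hk, rfl, hkc⟩ := h
  intro h'
  rw [mem_pvOcc] at h'
  obtain ⟨k', hk', hkk, hkc'⟩ := h'
  have : k = k' := by exact_mod_cast hkk
  subst this
  exact hne (hkc ▸ hkc')

-- two distinct members force length ≥ 2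
lemma two_mem_le_length {l : List Int} {a b : Int} (ha : a ∈ l) (hb : b ∈ l) (hab : a ≠ b) :
    2 ≤ l.length := by
  induction l with
  | nil => simp at ha
  | cons x xs ih =>
    rcases List.mem_cons.mp ha with rfl | ha'
    · rcases List.mem_cons.mp hb with rfl | hb'
      · exact absurd rfl hab
      · have := List.length_pos_of_mem hb'; simp; omega
    · have := List.length_pos_of_mem ha'; simp; omega

-- B's dict: getD is pvOcc
lemma getD_groups (cs : List Char) (c : Char) :
    (((PySem.List.enumerate cs 0).foldl
      (fun d p => d.modify p.2 [] (fun l => l ++ [p.1])) PySem.Dict.empty).getD c []) = pvOcc cs c := by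
  have h : (PySem.List.enumerate cs 0).foldl
      (fun d p => d.modify p.2 [] (fun l => l ++ [p.1])) PySem.Dict.empty
      = ((PySem.List.enumerate cs 0).map (fun p => (p.2, p.1))).foldl
      (fun d q => d.modify q.1 [] (fun l => l ++ [q.2])) PySem.Dict.empty := by
    rw [List.foldl_map]
  rw [h, PySem.Dict.getD_foldl_modify_append]
  simp [PySem.Dict.getD_empty, List.filter_map, List.map_map, Function.comp_def, pvOcc]

lemma keys_groups (cs : List Char) :
    ((PySem.List.enumerate cs 0).foldl
      (fun d p => d.modify p.2 [] (fun l => l ++ [p.1])) PySem.Dict.empty).keys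
      = PySem.Set.ofList cs := by
  have h2 := PySem.Dict.keys_foldl_modify_key (PySem.List.enumerate cs 0)
    (fun p : Int × Char => p.2) ([] : List Int) (fun _ p l => l ++ [p.1]) PySem.Dict.empty
  simp only [] at h2
  rw [h2]
  simp [PySem.Dict.keys_empty, PySem.Set.update_nil_left, PySem.List.map_snd_enumerate]

lemma nodup_keys_groups (cs : List Char) :
    ((PySem.List.enumerate cs 0).foldl
      (fun d p => d.modify p.2 [] (fun l => l ++ [p.1])) PySem.Dict.empty).keys.Nodup := by
  rw [keys_groups]; exact PySem.Set.nodup_ofList cs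

lemma foldl_update_eq_append (cs : List Char) :
    ∀ (L : List Char) (s : List Int), L.Nodup →
    (∀ c ∈ L, ∀ x ∈ pvOcc cs c, x ∉ s) →
    L.foldl (fun s c => if 2 ≤ (pvOcc cs c).length then PySem.Set.update s (pvOcc cs c) else s) s
      = s ++ L.flatMap (pvF cs) := by
  intro L
  induction L with
  | nil => intro s _ _; simp
  | cons c L' ih =>
    intro s hnd hdis
    have hcL' : c ∉ L' := (List.nodup_cons.mp hnd).1
    have hnd' : L'.Nodup := (List.nodup_cons.mp hnd).2
    simp only [List.foldl_cons, List.flatMap_cons]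
    by_cases hlen : 2 ≤ (pvOcc cs c).length
    · rw [if_pos hlen,
        PySem.Set.update_eq_append_of_disjoint s (pvOcc cs c) (nodup_pvOcc cs c)
          (fun x hx => hdis c (List.mem_cons_self) x hx)]
      rw [ih (s ++ pvOcc cs c) hnd' ?_]
      · simp [pvF, if_pos hlen]
      · intro c' hc' x hx
        simp only [List.mem_append]
        rintro (h1 | h2)
        · exact hdis c' (List.mem_cons_of_mem _ hc') x hx h1
        · exact pvOcc_disjoint (show c' ≠ c from fun he => hcL' (he ▸ hc')) hx h2
    · rw [if_neg hlen, ih s hnd' (fun c' hc' x hx => hdis c' (List.mem_cons_of_mem _ hc') x hx)]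
      simp [pvF, if_neg hlen]

lemma altB (s : String) :
    find_same___py_alt s = (PySem.Set.ofList s.toList).flatMap (pvF s.toList) := by
  unfold find_same___py_alt
  simp only []
  rw [PySem.Dict.values_eq_map_keys _ (nodup_keys_groups s.toList) []]
  rw [List.foldl_map]
  have hk := keys_groups s.toList
  rw [hk]
  have hg : ∀ (acc : List Int) (c : Char),
      (if 2 ≤ (((PySem.List.enumerate s.toList 0).foldl
          (fun d p => d.modify p.2 [] (fun l => l ++ [p.1])) PySem.Dict.empty).getD c []).length
        then PySem.Set.update acc (((PySem.List.enumerate s.toList 0).foldl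
          (fun d p => d.modify p.2 [] (fun l => l ++ [p.1])) PySem.Dict.empty).getD c [])
        else acc)
      = (if 2 ≤ (pvOcc s.toList c).length then PySem.Set.update acc (pvOcc s.toList c) else acc) := by
    intro acc c; rw [getD_groups]
  rw [PySem.List.foldl_congr_mem (PySem.Set.ofList s.toList) _
    (fun acc c => if 2 ≤ (pvOcc s.toList c).length then PySem.Set.update acc (pvOcc s.toList c) else acc)
    PySem.Set.empty (fun acc c _ => hg acc c)]
  rw [foldl_update_eq_append s.toList _ PySem.Set.empty (PySem.Set.nodup_ofList _) (by simp [PySem.Set.empty])]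
  simp [PySem.Set.empty]

def pvG (cs : List Char) (i j : Int) : List Int :=
  if PySem.List.pyGet? cs i = PySem.List.pyGet? cs j ∧ i ≠ j then [i] ++ [j] else []

lemma arrA (s : String) :
    find_same___py s =
      ((PySem.List.pyRange 0 (s.toList.length : Int) 1).flatMap (fun i =>
        (PySem.List.pyRange 0 (s.toList.length : Int) 1).flatMap (pvG s.toList i))).foldl
        PySem.Set.add [] := by
  unfold find_same___py
  simp only []
  have hlen : PySem.Str.len s = (s.toList.length : Int) := by simp [PySem.Str.len_eq]
  have hget : ∀ i : Int, PySem.Str.pyGet? s i = PySem.List.pyGet? s.toList i := by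
    intro i; simp [PySem.Str.pyGet?]
  have hinner : ∀ (i : Int) (acc : List Int),
      (PySem.List.pyRange 0 (s.toList.length : Int) 1).foldl (fun acc j =>
        if PySem.Str.pyGet? s i = PySem.Str.pyGet? s j ∧ i ≠ j
        then acc ++ [i] ++ [j] else acc) acc
      = acc ++ (PySem.List.pyRange 0 (s.toList.length : Int) 1).flatMap (pvG s.toList i) := by
    intro i acc
    have hfun : (fun (acc : List Int) j =>
        if PySem.Str.pyGet? s i = PySem.Str.pyGet? s j ∧ i ≠ j
        then acc ++ [i] ++ [j] else acc)
        = (fun acc j => acc ++ pvG s.toList i j) := by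
      funext acc j
      simp only [pvG, hget]
      split
      · simp
      · simp
    rw [hfun, PySem.List.foldl_append_eq_flatMap]
  have houter : (fun (acc : List Int) i =>
      (PySem.List.pyRange 0 (s.toList.length : Int) 1).foldl (fun acc j =>
        if PySem.Str.pyGet? s i = PySem.Str.pyGet? s j ∧ i ≠ j
        then acc ++ [i] ++ [j] else acc) acc)
      = (fun acc i => acc ++ (PySem.List.pyRange 0 (s.toList.length : Int) 1).flatMap (pvG s.toList i)) := by
    funext acc i; exact hinner i acc
  rw [hlen, houter, PySem.List.foldl_append_eq_flatMap, PySem.Set.ofList_eq_foldl]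
  simp

lemma foldl_add_of_subset : ∀ (l : List Int) (s : PySem.Set Int),
    (∀ x ∈ l, x ∈ s) → l.foldl PySem.Set.add s = s := by
  intro l
  induction l with
  | nil => intro s _; simp
  | cons a t ih =>
    intro s h
    simp only [List.foldl_cons]
    rw [PySem.Set.add_of_mem (h a List.mem_cons_self)]
    exact ih s (fun x hx => h x (List.mem_cons_of_mem _ hx))

lemma pairs_fold_mem : ∀ (J : List Int) (s : PySem.Set Int) (m : Int),
    m ∈ s → J.Nodup → (∀ j ∈ J, j ∉ s) →
    (J.flatMap (fun j => [m, j])).foldl PySem.Set.add s = s ++ J := by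
  intro J
  induction J with
  | nil => intro s m _ _ _; simp
  | cons j J' ih =>
    intro s m hm hnd hfresh
    simp only [List.flatMap_cons, List.foldl_append, List.foldl_cons, List.foldl_nil]
    rw [PySem.Set.add_of_mem hm, PySem.Set.add_of_not_mem (hfresh j List.mem_cons_self)]
    rw [ih (s ++ [j]) m (by simp [hm]) (List.nodup_cons.mp hnd).2 ?_]
    · simp
    · intro j' hj'
      simp only [List.mem_append, List.mem_singleton]
      rintro (h1 | h2)
      · exact hfresh j' (List.mem_cons_of_mem _ hj') h1
      · exact (List.nodup_cons.mp hnd).1 (h2 ▸ hj')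

lemma sorted_ext : ∀ (l₁ l₂ : List Int), l₁.Pairwise (· < ·) → l₂.Pairwise (· < ·) →
    (∀ x, x ∈ l₁ ↔ x ∈ l₂) → l₁ = l₂ := by
  intro l₁
  induction l₁ with
  | nil =>
    intro l₂ _ _ hm
    cases l₂ with
    | nil => rfl
    | cons b t => exact absurd ((hm b).mpr List.mem_cons_self) (by simp)
  | cons a t ih =>
    intro l₂ h₁ h₂ hm
    cases l₂ with
    | nil => exact absurd ((hm a).mp List.mem_cons_self) (by simp)
    | cons b t₂ =>
      have hab : a = b := by
        rcases List.mem_cons.mp ((hm a).mp List.mem_cons_self) with h | h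
        · exact h
        · rcases List.mem_cons.mp ((hm b).mpr List.mem_cons_self) with h' | h'
          · exact h'.symm
          · have hba := (List.pairwise_cons.mp h₂).1 a h
            have hab := (List.pairwise_cons.mp h₁).1 b h'
            omega
      subst hab
      have ht : t = t₂ := by
        apply ih t₂ (List.pairwise_cons.mp h₁).2 (List.pairwise_cons.mp h₂).2
        intro x
        constructor
        · intro hx
          have hax := (List.pairwise_cons.mp h₁).1 x hx
          rcases List.mem_cons.mp ((hm x).mp (List.mem_cons_of_mem _ hx)) with h | h
          · omega
          · exact h
        · intro hx
          have hax := (List.pairwise_cons.mp h₂).1 x hx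
          rcases List.mem_cons.mp ((hm x).mpr (List.mem_cons_of_mem _ hx)) with h | h
          · omega
          · exact h
      rw [ht]

lemma flatMap_ite_filter' (l : List Int) (p : Int → Prop) [DecidablePred p] (f : Int → List Int) :
    l.flatMap (fun j => if p j then f j else []) = (l.filter (fun j => decide (p j))).flatMap f := by
  induction l with
  | nil => simp
  | cons a t ih =>
    simp only [List.flatMap_cons, List.filter_cons]
    by_cases h : p a
    · simp [h, ih]
    · simp [h, ih]

lemma mem_take_char {cs : List Char} {m : Nat} {c : Char} :
    c ∈ cs.take m ↔ ∃ (k : Nat) (h : k < cs.length), k < m ∧ cs[k] = c := by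
  rw [List.mem_iff_getElem]
  constructor
  · rintro ⟨i, hi, he⟩
    have hi' : i < cs.length := lt_of_lt_of_le hi (by simp [List.length_take])
    have him : i < m := lt_of_lt_of_le hi (by simp [List.length_take])
    exact ⟨i, hi', him, by rw [← he]; exact (List.getElem_take).symm ▸ rfl⟩
  · rintro ⟨k, hk, hkm, he⟩
    exact ⟨k, by simp [List.length_take]; omega, by rw [List.getElem_take]; exact he⟩

lemma mem_pvOcc_int {cs : List Char} {c : Char} {x : Int}
    (h0 : 0 ≤ x) (hn : x < (cs.length : Int)) (hg : PySem.List.pyGet? cs x = some c) :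
    x ∈ pvOcc cs c := by
  have hlt : x.toNat < cs.length := by omega
  have hx : ((x.toNat : Nat) : Int) = x := by omega
  rw [mem_pvOcc]
  refine ⟨x.toNat, hlt, hx.symm, ?_⟩
  have := PySem.List.pyGet?_ofNat cs x.toNat hlt
  rw [hx, hg] at this
  exact (Option.some.injEq _ _).mp this.symm

lemma mainA (cs : List Char) : ∀ (m : Nat), m ≤ cs.length →
    ((PySem.List.pyRange 0 (m : Int) 1).flatMap (fun i =>
      (PySem.List.pyRange 0 (cs.length : Int) 1).flatMap (pvG cs i))).foldl PySem.Set.add []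
    = (PySem.Set.ofList (cs.take m)).flatMap (pvF cs) := by
  intro m
  induction m with
  | zero => intro _; simp [PySem.List.pyRange_one_eq_nil (le_refl (0 : Int))]
  | succ m ih =>
    intro hm
    have hmlt : m < cs.length := hm
    have hcast : ((m + 1 : Nat) : Int) = (m : Int) + 1 := by push_cast; ring
    rw [hcast, PySem.List.pyRange_one_succ_right (by positivity), List.flatMap_append,
      List.foldl_append, ih (le_of_lt hmlt)]
    set S := (PySem.Set.ofList (cs.take m)).flatMap (pvF cs) with hS
    set c := cs[m] with hc
    have hgetm : PySem.List.pyGet? cs (m : Int) = some c := PySem.List.pyGet?_ofNat cs m hmlt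
    -- P_m as a flatMap over the matching partner indices J
    set J := (PySem.List.pyRange 0 (cs.length : Int) 1).filter
      (fun j => decide (PySem.List.pyGet? cs (m : Int) = PySem.List.pyGet? cs j ∧ (m : Int) ≠ j)) with hJ
    have hPm : (PySem.List.pyRange 0 (cs.length : Int) 1).flatMap (pvG cs (m : Int))
        = J.flatMap (fun j => [(m : Int), j]) := by
      rw [hJ]
      rw [← flatMap_ite_filter' _ (fun j => PySem.List.pyGet? cs (m : Int) = PySem.List.pyGet? cs j ∧ (m : Int) ≠ j) (fun j => [(m : Int), j])]
      rfl
    have hmemJ : ∀ j : Int, j ∈ J ↔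
        (0 ≤ j ∧ j < (cs.length : Int) ∧ PySem.List.pyGet? cs j = some c ∧ (m : Int) ≠ j) := by
      intro j
      rw [hJ, List.mem_filter, PySem.List.mem_pyRange_one]
      simp only [decide_eq_true_eq]
      constructor
      · rintro ⟨⟨h1, h2⟩, h3, h4⟩
        exact ⟨h1, h2, by rw [← h3, hgetm], h4⟩
      · rintro ⟨h1, h2, h3, h4⟩
        exact ⟨⟨h1, h2⟩, by rw [hgetm, h3], h4⟩
    have hJocc : ∀ j ∈ J, j ∈ pvOcc cs c := by
      intro j hj
      obtain ⟨h1, h2, h3, _⟩ := (hmemJ j).mp hj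
      exact mem_pvOcc_int h1 h2 h3
    have hmocc : (m : Int) ∈ pvOcc cs c := by
      rw [mem_pvOcc]; exact ⟨m, hmlt, rfl, rfl⟩
    simp only [List.flatMap_cons, List.flatMap_nil, List.append_nil]
    rw [hPm]
    rw [List.take_succ_eq_append_getElem hmlt, PySem.Set.ofList_append_singleton]
    by_cases hcin : c ∈ cs.take m
    · -- character seen before: every appended index is already present
      rw [PySem.Set.add_of_mem ((PySem.Set.mem_ofList _ _).mpr hcin)]
      -- occ c has ≥ 2 elements
      obtain ⟨k, hk, hkm, hke⟩ := mem_take_char.mp hcin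
      have hkocc : ((k : Nat) : Int) ∈ pvOcc cs c := by rw [mem_pvOcc]; exact ⟨k, hk, rfl, hke⟩
      have hlen2 : 2 ≤ (pvOcc cs c).length :=
        two_mem_le_length hkocc hmocc (by omega)
      have hsub : ∀ x ∈ pvOcc cs c, x ∈ S := by
        intro x hx
        rw [hS, List.mem_flatMap]
        exact ⟨c, (PySem.Set.mem_ofList _ _).mpr hcin, by rw [pvF, if_pos hlen2]; exact hx⟩
      apply foldl_add_of_subset
      intro x hx
      rw [List.mem_flatMap] at hx
      obtain ⟨j, hj, hxj⟩ := hx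
      rcases List.mem_pair.mp hxj with rfl | rfl
      · exact hsub _ hmocc
      · exact hsub _ (hJocc _ hj)
    · -- first occurrence of c at index m
      have hfresh : ∀ x ∈ pvOcc cs c, x ∉ S := by
        intro x hx hxS
        rw [hS, List.mem_flatMap] at hxS
        obtain ⟨c', hc', hxc'⟩ := hxS
        have hx' : x ∈ pvOcc cs c' := by
          rw [pvF] at hxc'; split at hxc' <;> simp_all
        have hne : c ≠ c' := by
          rintro rfl; exact hcin ((PySem.Set.mem_ofList _ _).mp hc')
        exact pvOcc_disjoint hne hx hx'
      have hJgt : ∀ j ∈ J, (m : Int) < j := by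
        intro j hj
        obtain ⟨h1, h2, h3, h4⟩ := (hmemJ j).mp hj
        by_contra hnot
        have hjm : j < (m : Int) := by omega
        have hjn : j.toNat < m := by omega
        have hjl : j.toNat < cs.length := by omega
        have hxj : ((j.toNat : Nat) : Int) = j := by omega
        have := PySem.List.pyGet?_ofNat cs j.toNat hjl
        rw [hxj, h3] at this
        exact hcin (mem_take_char.mpr ⟨j.toNat, hjl, hjn, ((Option.some.injEq _ _).mp this.symm)⟩)
      have hJpw : J.Pairwise (· < ·) :=
        List.Pairwise.filter _ (PySem.List.pairwise_lt_pyRange_one 0 (cs.length : Int))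
      have hocc : pvOcc cs c = (m : Int) :: J := by
        apply sorted_ext _ _ (pairwise_pvOcc cs c)
        · exact List.pairwise_cons.mpr ⟨hJgt, hJpw⟩
        · intro x
          constructor
          · intro hx
            rw [mem_pvOcc] at hx
            obtain ⟨k, hk, rfl, hke⟩ := hx
            by_cases hkm : k = m
            · subst hkm; exact List.mem_cons_self
            · refine List.mem_cons_of_mem _ ((hmemJ _).mpr ⟨by omega, by omega, ?_, by omega⟩)
              rw [PySem.List.pyGet?_ofNat cs k hk, hke]
          · intro hx
            rcases List.mem_cons.mp hx with rfl | hx'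
            · exact hmocc
            · exact hJocc _ hx'
      rw [PySem.Set.add_of_not_mem (fun hmem => hcin ((PySem.Set.mem_ofList _ _).mp hmem))]
      rw [List.flatMap_append, List.flatMap_singleton]
      cases hJnil : J with
      | nil =>
        have : pvF cs c = [] := by
          rw [pvF, hocc, hJnil, if_neg (by simp)]
        rw [this]
        simpa using hS
      | cons j₀ J' =>
        rw [hJnil] at hocc hJpw hJgt
        have hlen2 : 2 ≤ (pvOcc cs c).length := by rw [hocc]; simp
        have hFc : pvF cs c = (m : Int) :: j₀ :: J' := by rw [pvF, if_pos hlen2, hocc]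
        have hj₀J : j₀ ∈ j₀ :: J' := List.mem_cons_self
        have hmS : (m : Int) ∉ S := hfresh _ hmocc
        have hj₀S : j₀ ∉ S := hfresh _ (by rw [hocc]; exact List.mem_cons_of_mem _ hj₀J)
        simp only [List.flatMap_cons, List.foldl_append, List.foldl_cons, List.foldl_nil]
        rw [PySem.Set.add_of_not_mem hmS,
          PySem.Set.add_of_not_mem (by
            simp only [List.mem_append, List.mem_singleton]
            rintro (h | h)
            · exact hj₀S h
            · exact absurd h.symm (ne_of_lt (hJgt j₀ hj₀J)))]
        rw [pairs_fold_mem J' (S ++ [(m : Int)] ++ [j₀]) (m : Int)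
          (by simp) ((List.pairwise_cons.mp hJpw).2.imp ne_of_lt) ?_]
        · rw [hFc, ← hS]; simp
        · intro j' hj'
          have hj'J : j' ∈ j₀ :: J' := List.mem_cons_of_mem _ hj'
          simp only [List.mem_append, List.mem_singleton]
          rintro ((h | h) | h)
          · exact hfresh j' (by rw [hocc]; exact List.mem_cons_of_mem _ hj'J) h
          · exact absurd h.symm (ne_of_lt (hJgt j' hj'J))
          · exact absurd h.symm (ne_of_lt ((List.pairwise_cons.mp hJpw).1 j' hj'))


lemma find_same_AB (s : String) : find_same___py s = find_same___py_alt s := by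
  rw [arrA, altB]
  have := mainA s.toList s.toList.length le_rfl
  rw [List.take_length] at this
  exact this

-- ===== VERDICT (by name: the statement is the Claim_ definition above) =====
theorem find_same___py_spec : Claim_equal_find_same___py := by
  intro string _
  exact find_same_AB string
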